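-- pv_equiv track=rewrite | github.com/dohui-son/Python-Algorithms | programmers/p최고의집합.py | solution
-- ===== SOURCE A (Python) =====
-- def solution(n, s):
--     if n > s: return [-1]
--     arr = [s//n]*n
--     if s%n:
--         summ = sum(arr)
--         for i in range(n-1, -1, -1):
--             summ += 1
--             arr[i] += 1
--             if summ == s: break
--     return arr
--
--
--     # multiple의 최대 결과를 위해서는 곱하는 수들의 차이가 가장 적어야한다
--     def bestSet(n, s):
--         answer = []
--         a = int(s/n)
--         if a == 0: return [-1]
--         b = s%n
--         for i in range(n-b):
--             answer.append(a)
--         for i in range(b):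
--             answer.append(a+1)
--
--     return answer
-- ===== SOURCE B (Python) =====
-- def solution(n, s):
--     if n > s: return [-1]
--     a, b = divmod(s, n)
--     return [a] * (n - b) + [a + 1] * b
-- ===== Notes on version B (the rewrite author's own statement) =====
-- stated objective: simpler
-- what changed: Replaces A's replicate-then-decrementing loop with a running-sum accumulator and early break by a direct closed form: divmod(s, n) gives the base value and remainder, and the answer is [a]*(n-b) + [a+1]*b with no loop at all.
import Mathlib
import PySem

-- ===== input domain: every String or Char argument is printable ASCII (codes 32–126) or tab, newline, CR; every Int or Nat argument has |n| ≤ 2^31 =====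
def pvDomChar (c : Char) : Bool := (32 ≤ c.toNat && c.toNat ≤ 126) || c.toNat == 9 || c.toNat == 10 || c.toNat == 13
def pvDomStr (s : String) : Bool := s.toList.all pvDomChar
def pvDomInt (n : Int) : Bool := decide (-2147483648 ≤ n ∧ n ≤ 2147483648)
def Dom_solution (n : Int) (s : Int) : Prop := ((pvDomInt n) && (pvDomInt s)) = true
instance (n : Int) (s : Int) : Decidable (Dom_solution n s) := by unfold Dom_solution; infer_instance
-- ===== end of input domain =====

-- B replaces A's decrement-from-the-end loop with the closed form [a]*(n-b) + [a+1]*b from divmod(s, n); return values only.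

-- ===== PORT A =====
-- the 'for i in range(n-1, -1, -1): … if summ == s: break' loop, with fuel k = i+1
-- (indices n-1 … 0 are nonnegative and in range, so List.set/getD at i is exact xs[i])
def solutionLoop (s : Int) : Nat → Int → List Int → List Int
  | 0, _, arr => arr
  | k + 1, summ, arr =>
      let summ' := summ + 1
      let arr' := arr.set k (arr.getD k 0 + 1)
      if summ' = s then arr' else solutionLoop s k summ' arr'

def solution (n : Int) (s : Int) : List Int :=
  if n > s then [-1]
  else
    let arr := List.replicate n.toNat (PySem.Int.floordiv s n)
    if PySem.Int.mod s n ≠ 0 then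
      solutionLoop s n.toNat arr.sum arr
    else arr

-- ===== PORT B =====
def solution_alt (n : Int) (s : Int) : List Int :=
  if n > s then [-1]
  else
    let a := PySem.Int.floordiv s n
    let b := PySem.Int.mod s n
    List.replicate (n - b).toNat a ++ List.replicate b.toNat (a + 1)

-- ===== PRECONDITION & SPEC =====
-- Pre_ excludes only n = 0 with 0 ≤ s, where Python A raises ZeroDivisionError (and so does B).
def Pre_solution (n : Int) (s : Int) : Prop := n = 0 → s < 0
instance (n : Int) (s : Int) : Decidable (Pre_solution n s) := by unfold Pre_solution; infer_instance
def pvWitness_solution : Int × Int := (3, 11)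

def Spec_solution (n : Int) (s : Int) (out : List Int) : Prop := out = solution_alt n s
instance (n : Int) (s : Int) (out : List Int) : Decidable (Spec_solution n s out) := by unfold Spec_solution; infer_instance

-- ===== CLAIM (what is proved, stated in full; the proofs are below) =====
def Claim_equal_solution : Prop := ∀ (n : Int) (s : Int), Dom_solution n s → Pre_solution n s → Spec_solution n s (solution n s)

-- ===== LEMMAS AND PROOFS =====

-- setting the last 'a' of the leading replicate block
theorem set_replicate_append (k : Nat) (a x : Int) (t : List Int) :
    (List.replicate (k + 1) a ++ t).set k x = List.replicate k a ++ x :: t := by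
  induction k with
  | zero => simp
  | succ k ih => simpa [List.replicate_succ] using ih

theorem getD_replicate_append (k : Nat) (a : Int) (t : List Int) :
    (List.replicate (k + 1) a ++ t).getD k 0 = a := by
  induction k with
  | zero => simp
  | succ k ih => simpa [List.replicate_succ] using ih

-- loop invariant: after j of the b needed increments, with k = N - j indices left
theorem solutionLoop_invariant (s a : Int) (N b : Nat) (hb : b ≤ N) :
    ∀ k j : Nat, k + j = N → j < b → s = N * a + b →
    solutionLoop s k (N * a + j) (List.replicate k a ++ List.replicate j (a + 1))
      = List.replicate (N - b) a ++ List.replicate b (a + 1) := by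
  intro k
  induction k with
  | zero => intro j hkj hjb hs; omega
  | succ k ih =>
      intro j hkj hjb hs
      rw [solutionLoop]
      simp only [getD_replicate_append, set_replicate_append]
      by_cases hbreak : (N : Int) * a + j + 1 = s
      · have hjb' : j + 1 = b := by omega
        have hk : k = N - b := by omega
        rw [if_pos hbreak, hk, ← hjb']
        simp [List.replicate_succ]
      · rw [if_neg hbreak]
        have hjb2 : j + 1 < b := by omega
        have := ih (j + 1) (by omega) hjb2 hs
        have harr : List.replicate k a ++ (a + 1) :: List.replicate j (a + 1)
            = List.replicate k a ++ List.replicate (j + 1) (a + 1) := by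
          simp [List.replicate_succ]
        have hsum : (N : Int) * a + j + 1 = N * a + ((j + 1 : Nat) : Int) := by push_cast; ring
        rw [harr, hsum, this]

theorem solution_spec : Claim_equal_solution := by
  intro n s _ hpre
  unfold Spec_solution solution solution_alt
  by_cases hns : n > s
  · simp [hns]
  · simp only [if_neg hns]
    set a := PySem.Int.floordiv s n with ha
    set b := PySem.Int.mod s n with hbdef
    have hn0 : n ≠ 0 := by
      intro h; subst h; exact absurd (hpre rfl) (by omega)
    have hdm : a * n + b = s := PySem.Int.floordiv_mul_add_mod s n
    rcases lt_or_gt_of_ne hn0 with hneg | hpos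
    · -- n < 0 : everything is empty on both sides
      have hb := PySem.Int.mod_neg_bounds s hneg
      have hn : n.toNat = 0 := by omega
      have hb0 : b.toNat = 0 := by omega
      have hnb : (n - b).toNat = 0 := by omega
      by_cases hm : b ≠ 0 <;>
        simp [hn, hb0, hnb, hm, solutionLoop]
    · -- n > 0
      have hb0 : 0 ≤ b := PySem.Int.mod_nonneg s hpos
      have hblt : b < n := PySem.Int.mod_lt s hpos
      by_cases hm : b ≠ 0
      · simp only [if_pos hm]
        have hNb : b.toNat ≤ n.toNat := by omega
        have hsum : (List.replicate n.toNat a).sum = (n.toNat : Int) * a := by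
          simp [List.sum_replicate]
        have key := solutionLoop_invariant s a n.toNat b.toNat hNb n.toNat 0
          (by omega) (by omega) (by
            have hc1 : ((n.toNat : Nat) : Int) = n := by omega
            have hc2 : ((b.toNat : Nat) : Int) = b := by omega
            rw [hc1, hc2]
            linarith [hdm, mul_comm a n])
        simp only [List.replicate_zero, List.append_nil, Nat.cast_zero, add_zero] at key
        rw [hsum]
        rw [key]
        have hnbt : (n - b).toNat = n.toNat - b.toNat := by omega
        rw [hnbt]
      · simp only [if_neg hm]
        rw [not_not] at hm
        rw [hm]
        simp
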